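-- pv_equiv track=rewrite | github.com/BrianMills2718/kgas1 | src/core/ontology_validation/suggestion_engine.py | _extract_context_clues
-- ===== SOURCE A (Python) =====
-- from typing import List, Dict, Any, Optional, Tuple
--
-- def _extract_context_clues(context_words: List[str]) -> Dict[str, List[str]]:
--     """Extract context clues from context words"""
--     clues = {
--         "people_indicators": [],
--         "organization_indicators": [],
--         "location_indicators": [],
--         "event_indicators": [],
--         "concept_indicators": []
--     }
--
--     # Define indicator words for different entity categories
--     indicators = {
--         "people_indicators": ["person", "individual", "human", "doctor", "professor", "ceo", "manager", "employee"],
--         "organization_indicators": ["company", "corporation", "organization", "institution", "business", "firm"],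
--         "location_indicators": ["city", "country", "building", "office", "place", "location", "region"],
--         "event_indicators": ["meeting", "conference", "event", "activity", "process", "action"],
--         "concept_indicators": ["concept", "idea", "principle", "theory", "abstract", "notion"]
--     }
--
--     for category, words in indicators.items():
--         for word in context_words:
--             if word in words:
--                 clues[category].append(word)
--
--     return clues
-- ===== SOURCE B (Python) =====
-- from typing import List, Dict
--
-- def _extract_context_clues(context_words: List[str]) -> Dict[str, List[str]]:
--     """Extract context clues from context words (reverse-index, single pass)."""
--     indicators = {
--         "people_indicators": ["person", "individual", "human", "doctor", "professor", "ceo", "manager", "employee"],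
--         "organization_indicators": ["company", "corporation", "organization", "institution", "business", "firm"],
--         "location_indicators": ["city", "country", "building", "office", "place", "location", "region"],
--         "event_indicators": ["meeting", "conference", "event", "activity", "process", "action"],
--         "concept_indicators": ["concept", "idea", "principle", "theory", "abstract", "notion"]
--     }
--     category_of = {word: category for category, words in indicators.items() for word in words}
--     clues = {category: [] for category in indicators}
--     for word in context_words:
--         category = category_of.get(word)
--         if category is not None:
--             clues[category].append(word)
--     return clues
-- ===== Notes on version B (the rewrite author's own statement) =====
-- stated objective: idiomatic
-- what changed: B inverts the fixed indicator table once into a word-to-category reverse index and makes a single pass over context_words, instead of A's outer loop over categories that rescans context_words once per category.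
import Mathlib
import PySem

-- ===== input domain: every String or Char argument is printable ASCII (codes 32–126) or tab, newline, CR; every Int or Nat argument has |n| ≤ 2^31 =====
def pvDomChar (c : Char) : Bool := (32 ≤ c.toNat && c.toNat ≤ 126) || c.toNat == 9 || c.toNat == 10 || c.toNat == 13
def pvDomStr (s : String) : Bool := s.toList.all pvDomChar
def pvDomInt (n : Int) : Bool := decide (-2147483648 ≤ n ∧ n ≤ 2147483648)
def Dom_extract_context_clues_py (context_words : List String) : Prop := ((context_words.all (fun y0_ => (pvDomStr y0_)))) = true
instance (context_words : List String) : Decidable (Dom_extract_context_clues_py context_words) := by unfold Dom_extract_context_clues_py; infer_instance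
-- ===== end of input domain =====

-- B replaces A's category-by-category repeated scans over context_words with a reverse index
-- (word → category) built once from the fixed table, then a single pass over context_words (idiomatic).

-- The fixed indicator table (the same literal appears in both Pythons).
def pvWords1 : List String := ["person", "individual", "human", "doctor", "professor", "ceo", "manager", "employee"]
def pvWords2 : List String := ["company", "corporation", "organization", "institution", "business", "firm"]
def pvWords3 : List String := ["city", "country", "building", "office", "place", "location", "region"]
def pvWords4 : List String := ["meeting", "conference", "event", "activity", "process", "action"]
def pvWords5 : List String := ["concept", "idea", "principle", "theory", "abstract", "notion"]

def pvIndicators : PySem.Dict String (List String) :=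
  PySem.Dict.ofList
    [("people_indicators", pvWords1), ("organization_indicators", pvWords2),
     ("location_indicators", pvWords3), ("event_indicators", pvWords4),
     ("concept_indicators", pvWords5)]

-- ===== PORT A =====
def pvCluesInitA : PySem.Dict String (List String) :=
  PySem.Dict.ofList
    [("people_indicators", []), ("organization_indicators", []), ("location_indicators", []),
     ("event_indicators", []), ("concept_indicators", [])]

def extract_context_clues_py (context_words : List String) : List (String × List String) :=
  (pvIndicators.items.foldl
    (fun clues cat_words =>
      context_words.foldl
        (fun clues word =>
          if cat_words.2.contains word then
            clues.modify cat_words.1 [] (fun l => l ++ [word])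
          else clues)
        clues)
    pvCluesInitA).items

-- ===== PORT B =====
-- category_of = {word: category for category, words in indicators.items() for word in words}
def pvCategoryOf : PySem.Dict String String :=
  pvIndicators.items.foldl
    (fun d cat_words => cat_words.2.foldl (fun d w => d.insert w cat_words.1) d)
    PySem.Dict.empty

-- clues = {category: [] for category in indicators}
def pvCluesInitB : PySem.Dict String (List String) :=
  pvIndicators.keys.foldl (fun d k => d.insert k ([] : List String)) PySem.Dict.empty

def extract_context_clues_py_alt (context_words : List String) : List (String × List String) :=
  (context_words.foldl
    (fun clues word =>
      match pvCategoryOf.get? word with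
      | some category => clues.modify category [] (fun l => l ++ [word])
      | none => clues)
    pvCluesInitB).items

-- ===== PRECONDITION & SPEC =====
def Spec_extract_context_clues_py (context_words : List String) (out : List (String × List String)) : Prop := out = extract_context_clues_py_alt context_words
instance (context_words : List String) (out : List (String × List String)) : Decidable (Spec_extract_context_clues_py context_words out) := by unfold Spec_extract_context_clues_py; infer_instance

-- ===== CLAIM (what is proved, stated in full; the proofs are below) =====
def Claim_equal_extract_context_clues_py : Prop := ∀ (context_words : List String), Dom_extract_context_clues_py context_words → Spec_extract_context_clues_py context_words (extract_context_clues_py context_words)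

-- ===== LEMMAS AND PROOFS =====

-- The five-key clues dict with symbolic per-category lists.
def pvMk (l1 l2 l3 l4 l5 : List String) : PySem.Dict String (List String) :=
  PySem.Dict.mk
    [("people_indicators", l1), ("organization_indicators", l2), ("location_indicators", l3),
     ("event_indicators", l4), ("concept_indicators", l5)]

@[simp] theorem pvModify1 (f : List String → List String) (l1 l2 l3 l4 l5 : List String) :
    (pvMk l1 l2 l3 l4 l5).modify "people_indicators" [] f = pvMk (f l1) l2 l3 l4 l5 := rfl
@[simp] theorem pvModify2 (f : List String → List String) (l1 l2 l3 l4 l5 : List String) :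
    (pvMk l1 l2 l3 l4 l5).modify "organization_indicators" [] f = pvMk l1 (f l2) l3 l4 l5 := rfl
@[simp] theorem pvModify3 (f : List String → List String) (l1 l2 l3 l4 l5 : List String) :
    (pvMk l1 l2 l3 l4 l5).modify "location_indicators" [] f = pvMk l1 l2 (f l3) l4 l5 := rfl
@[simp] theorem pvModify4 (f : List String → List String) (l1 l2 l3 l4 l5 : List String) :
    (pvMk l1 l2 l3 l4 l5).modify "event_indicators" [] f = pvMk l1 l2 l3 (f l4) l5 := rfl
@[simp] theorem pvModify5 (f : List String → List String) (l1 l2 l3 l4 l5 : List String) :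
    (pvMk l1 l2 l3 l4 l5).modify "concept_indicators" [] f = pvMk l1 l2 l3 l4 (f l5) := rfl

-- A's inner loop for each concrete category key.
theorem pvInnerA1 (ws : List String) (ctx l1 l2 l3 l4 l5 : List String) :
    ctx.foldl (fun clues word => if ws.contains word then clues.modify "people_indicators" [] (fun l => l ++ [word]) else clues) (pvMk l1 l2 l3 l4 l5)
      = pvMk (l1 ++ ctx.filter ws.contains) l2 l3 l4 l5 := by
  induction ctx generalizing l1 with
  | nil => simp
  | cons w rest ih =>
    simp only [List.foldl_cons]
    by_cases h : ws.contains w = true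
    · rw [if_pos h, pvModify1, ih, List.filter_cons, if_pos h]; simp
    · rw [if_neg h, ih, List.filter_cons, if_neg h]

theorem pvInnerA2 (ws : List String) (ctx l1 l2 l3 l4 l5 : List String) :
    ctx.foldl (fun clues word => if ws.contains word then clues.modify "organization_indicators" [] (fun l => l ++ [word]) else clues) (pvMk l1 l2 l3 l4 l5)
      = pvMk l1 (l2 ++ ctx.filter ws.contains) l3 l4 l5 := by
  induction ctx generalizing l2 with
  | nil => simp
  | cons w rest ih =>
    simp only [List.foldl_cons]
    by_cases h : ws.contains w = true
    · rw [if_pos h, pvModify2, ih, List.filter_cons, if_pos h]; simp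
    · rw [if_neg h, ih, List.filter_cons, if_neg h]

theorem pvInnerA3 (ws : List String) (ctx l1 l2 l3 l4 l5 : List String) :
    ctx.foldl (fun clues word => if ws.contains word then clues.modify "location_indicators" [] (fun l => l ++ [word]) else clues) (pvMk l1 l2 l3 l4 l5)
      = pvMk l1 l2 (l3 ++ ctx.filter ws.contains) l4 l5 := by
  induction ctx generalizing l3 with
  | nil => simp
  | cons w rest ih =>
    simp only [List.foldl_cons]
    by_cases h : ws.contains w = true
    · rw [if_pos h, pvModify3, ih, List.filter_cons, if_pos h]; simp
    · rw [if_neg h, ih, List.filter_cons, if_neg h]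

theorem pvInnerA4 (ws : List String) (ctx l1 l2 l3 l4 l5 : List String) :
    ctx.foldl (fun clues word => if ws.contains word then clues.modify "event_indicators" [] (fun l => l ++ [word]) else clues) (pvMk l1 l2 l3 l4 l5)
      = pvMk l1 l2 l3 (l4 ++ ctx.filter ws.contains) l5 := by
  induction ctx generalizing l4 with
  | nil => simp
  | cons w rest ih =>
    simp only [List.foldl_cons]
    by_cases h : ws.contains w = true
    · rw [if_pos h, pvModify4, ih, List.filter_cons, if_pos h]; simp
    · rw [if_neg h, ih, List.filter_cons, if_neg h]

theorem pvInnerA5 (ws : List String) (ctx l1 l2 l3 l4 l5 : List String) :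
    ctx.foldl (fun clues word => if ws.contains word then clues.modify "concept_indicators" [] (fun l => l ++ [word]) else clues) (pvMk l1 l2 l3 l4 l5)
      = pvMk l1 l2 l3 l4 (l5 ++ ctx.filter ws.contains) := by
  induction ctx generalizing l5 with
  | nil => simp
  | cons w rest ih =>
    simp only [List.foldl_cons]
    by_cases h : ws.contains w = true
    · rw [if_pos h, pvModify5, ih, List.filter_cons, if_pos h]; simp
    · rw [if_neg h, ih, List.filter_cons, if_neg h]

theorem pvA_eq (ctx : List String) :
    extract_context_clues_py ctx
      = (pvMk (ctx.filter pvWords1.contains) (ctx.filter pvWords2.contains)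
          (ctx.filter pvWords3.contains) (ctx.filter pvWords4.contains)
          (ctx.filter pvWords5.contains)).items := by
  have hinit : pvCluesInitA = pvMk [] [] [] [] [] := rfl
  have hitems : pvIndicators.items =
      [("people_indicators", pvWords1), ("organization_indicators", pvWords2),
       ("location_indicators", pvWords3), ("event_indicators", pvWords4),
       ("concept_indicators", pvWords5)] := rfl
  simp only [extract_context_clues_py, hinit, hitems, List.foldl_cons, List.foldl_nil,
    pvInnerA1, pvInnerA2, pvInnerA3, pvInnerA4, pvInnerA5, List.nil_append]

-- get? of a constant-value insert loop.
theorem pv_get?_foldl_insert_const (c : String) (ws : List String) (d : PySem.Dict String String) (w : String) :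
    (ws.foldl (fun d x => d.insert x c) d).get? w = if ws.contains w then some c else d.get? w := by
  induction ws generalizing d with
  | nil => simp
  | cons x rest ih =>
    simp only [List.foldl_cons, ih, PySem.Dict.get?_insert, List.contains_cons]
    by_cases hw : w = x <;> simp [hw]

-- the reverse index looks a word up category by category (later categories overwrite, but the lists are disjoint)
theorem pvLookup (w : String) : pvCategoryOf.get? w =
    (if pvWords5.contains w then some "concept_indicators"
     else if pvWords4.contains w then some "event_indicators"
     else if pvWords3.contains w then some "location_indicators"
     else if pvWords2.contains w then some "organization_indicators"
     else if pvWords1.contains w then some "people_indicators"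
     else none) := by
  have hitems : pvIndicators.items =
      [("people_indicators", pvWords1), ("organization_indicators", pvWords2),
       ("location_indicators", pvWords3), ("event_indicators", pvWords4),
       ("concept_indicators", pvWords5)] := rfl
  simp only [pvCategoryOf, hitems, List.foldl_cons, List.foldl_nil,
    pv_get?_foldl_insert_const, PySem.Dict.get?_empty]

-- pairwise disjointness of the indicator lists (later list → not in an earlier one)
theorem pvD21 (w : String) (h : w ∈ pvWords2) : w ∉ pvWords1 := by
  simp [pvWords2] at h; rcases h with rfl|rfl|rfl|rfl|rfl|rfl <;> decide
theorem pvD31 (w : String) (h : w ∈ pvWords3) : w ∉ pvWords1 := by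
  simp [pvWords3] at h; rcases h with rfl|rfl|rfl|rfl|rfl|rfl|rfl <;> decide
theorem pvD32 (w : String) (h : w ∈ pvWords3) : w ∉ pvWords2 := by
  simp [pvWords3] at h; rcases h with rfl|rfl|rfl|rfl|rfl|rfl|rfl <;> decide
theorem pvD41 (w : String) (h : w ∈ pvWords4) : w ∉ pvWords1 := by
  simp [pvWords4] at h; rcases h with rfl|rfl|rfl|rfl|rfl|rfl <;> decide
theorem pvD42 (w : String) (h : w ∈ pvWords4) : w ∉ pvWords2 := by
  simp [pvWords4] at h; rcases h with rfl|rfl|rfl|rfl|rfl|rfl <;> decide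
theorem pvD43 (w : String) (h : w ∈ pvWords4) : w ∉ pvWords3 := by
  simp [pvWords4] at h; rcases h with rfl|rfl|rfl|rfl|rfl|rfl <;> decide
theorem pvD51 (w : String) (h : w ∈ pvWords5) : w ∉ pvWords1 := by
  simp [pvWords5] at h; rcases h with rfl|rfl|rfl|rfl|rfl|rfl <;> decide
theorem pvD52 (w : String) (h : w ∈ pvWords5) : w ∉ pvWords2 := by
  simp [pvWords5] at h; rcases h with rfl|rfl|rfl|rfl|rfl|rfl <;> decide
theorem pvD53 (w : String) (h : w ∈ pvWords5) : w ∉ pvWords3 := by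
  simp [pvWords5] at h; rcases h with rfl|rfl|rfl|rfl|rfl|rfl <;> decide
theorem pvD54 (w : String) (h : w ∈ pvWords5) : w ∉ pvWords4 := by
  simp [pvWords5] at h; rcases h with rfl|rfl|rfl|rfl|rfl|rfl <;> decide

-- B's single pass, characterized.
theorem pvB_fold (ctx l1 l2 l3 l4 l5 : List String) :
    ctx.foldl
      (fun clues word =>
        match pvCategoryOf.get? word with
        | some category => clues.modify category [] (fun l => l ++ [word])
        | none => clues)
      (pvMk l1 l2 l3 l4 l5)
      = pvMk (l1 ++ ctx.filter pvWords1.contains) (l2 ++ ctx.filter pvWords2.contains)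
          (l3 ++ ctx.filter pvWords3.contains) (l4 ++ ctx.filter pvWords4.contains)
          (l5 ++ ctx.filter pvWords5.contains) := by
  induction ctx generalizing l1 l2 l3 l4 l5 with
  | nil => simp
  | cons w rest ih =>
    simp only [List.foldl_cons]
    by_cases h5 : w ∈ pvWords5
    · have b5 : pvWords5.contains w = true := by simpa using h5
      have b4 : pvWords4.contains w = false := by simpa using pvD54 w h5
      have b3 : pvWords3.contains w = false := by simpa using pvD53 w h5
      have b2 : pvWords2.contains w = false := by simpa using pvD52 w h5
      have b1 : pvWords1.contains w = false := by simpa using pvD51 w h5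
      rw [pvLookup w, if_pos b5]
      simp [List.filter_cons, h5, pvD51 w h5, pvD52 w h5, pvD53 w h5, pvD54 w h5, ih]
    · have b5 : pvWords5.contains w = false := by simpa using h5
      by_cases h4 : w ∈ pvWords4
      · have b4 : pvWords4.contains w = true := by simpa using h4
        have b3 : pvWords3.contains w = false := by simpa using pvD43 w h4
        have b2 : pvWords2.contains w = false := by simpa using pvD42 w h4
        have b1 : pvWords1.contains w = false := by simpa using pvD41 w h4
        rw [pvLookup w, if_neg (by simpa using h5), if_pos b4]
        simp [List.filter_cons, h5, h4, pvD41 w h4, pvD42 w h4, pvD43 w h4, ih]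
      · have b4 : pvWords4.contains w = false := by simpa using h4
        by_cases h3 : w ∈ pvWords3
        · have b3 : pvWords3.contains w = true := by simpa using h3
          have b2 : pvWords2.contains w = false := by simpa using pvD32 w h3
          have b1 : pvWords1.contains w = false := by simpa using pvD31 w h3
          rw [pvLookup w, if_neg (by simpa using h5), if_neg (by simpa using h4), if_pos b3]
          simp [List.filter_cons, h5, h4, h3, pvD31 w h3, pvD32 w h3, ih]
        · have b3 : pvWords3.contains w = false := by simpa using h3
          by_cases h2 : w ∈ pvWords2
          · have b2 : pvWords2.contains w = true := by simpa using h2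
            have b1 : pvWords1.contains w = false := by simpa using pvD21 w h2
            rw [pvLookup w, if_neg (by simpa using h5), if_neg (by simpa using h4),
              if_neg (by simpa using h3), if_pos b2]
            simp [List.filter_cons, h5, h4, h3, h2, pvD21 w h2, ih]
          · have b2 : pvWords2.contains w = false := by simpa using h2
            by_cases h1 : w ∈ pvWords1
            · have b1 : pvWords1.contains w = true := by simpa using h1
              rw [pvLookup w, if_neg (by simpa using h5), if_neg (by simpa using h4),
                if_neg (by simpa using h3), if_neg (by simpa using h2), if_pos b1]
              simp [List.filter_cons, h5, h4, h3, h2, h1, ih]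
            · have b1 : pvWords1.contains w = false := by simpa using h1
              rw [pvLookup w, if_neg (by simpa using h5), if_neg (by simpa using h4),
                if_neg (by simpa using h3), if_neg (by simpa using h2), if_neg (by simpa using h1)]
              simp [List.filter_cons, h5, h4, h3, h2, h1, ih]

theorem pvB_eq (ctx : List String) :
    extract_context_clues_py_alt ctx
      = (pvMk (ctx.filter pvWords1.contains) (ctx.filter pvWords2.contains)
          (ctx.filter pvWords3.contains) (ctx.filter pvWords4.contains)
          (ctx.filter pvWords5.contains)).items := by
  have hinit : pvCluesInitB = pvMk [] [] [] [] [] := rfl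
  simp only [extract_context_clues_py_alt, hinit, pvB_fold, List.nil_append]

-- ===== VERDICT (by name: the statement is the Claim_ definition above) =====
theorem extract_context_clues_py_spec : Claim_equal_extract_context_clues_py := by
  intro ctx _
  unfold Spec_extract_context_clues_py
  rw [pvA_eq, pvB_eq]
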